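-- pv_equiv track=rewrite | github.com/edt-yxz-zzd/python3_src | nn_ns/math_nn/integer/all_pairwise_coprime_are_1.py | all_pairwise_coprime_are_1
-- ===== SOURCE A (Python) =====
-- from math import gcd
-- from numbers import Integral
--
-- def all_pairwise_coprime_are_1(ints):
--     # Iter Integer -> Bool
--     # return all(i==j or gcd(input[i], input[j])==1 for any i,j <- [0..len(input)])
--
--     if __debug__:
--         def iter_ints(ints):
--             for i in ints:
--                 if not isinstance(i, Integral): raise TypeError
--                 yield i
--         ints = iter_ints(ints)
--     ints = iter(ints)
--
--     for M in ints:
--         break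
--     for i in ints:
--         if gcd(i, M) != 1: return False
--         M *= i
--     return True
-- ===== SOURCE B (Python) =====
-- from math import gcd
-- from numbers import Integral
--
-- def all_pairwise_coprime_are_1(ints):
--     # Iter Integer -> Bool
--     # naive nested pairwise scan against the elements seen so far
--     if __debug__:
--         def iter_ints(ints):
--             for i in ints:
--                 if not isinstance(i, Integral): raise TypeError
--                 yield i
--         ints = iter_ints(ints)
--     ints = iter(ints)
--     seen = []
--     for i in ints:
--         for p in seen:
--             if gcd(i, p) != 1:
--                 return False
--         seen.append(i)
--     return True
-- ===== Notes on version B (the rewrite author's own statement) =====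
-- stated objective: alternative
-- what changed: Replaces the running-product accumulator (gcd of each new element against the product of all previous ones) with a nested scan that checks gcd of each new element against every previously seen element directly.
import Mathlib
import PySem

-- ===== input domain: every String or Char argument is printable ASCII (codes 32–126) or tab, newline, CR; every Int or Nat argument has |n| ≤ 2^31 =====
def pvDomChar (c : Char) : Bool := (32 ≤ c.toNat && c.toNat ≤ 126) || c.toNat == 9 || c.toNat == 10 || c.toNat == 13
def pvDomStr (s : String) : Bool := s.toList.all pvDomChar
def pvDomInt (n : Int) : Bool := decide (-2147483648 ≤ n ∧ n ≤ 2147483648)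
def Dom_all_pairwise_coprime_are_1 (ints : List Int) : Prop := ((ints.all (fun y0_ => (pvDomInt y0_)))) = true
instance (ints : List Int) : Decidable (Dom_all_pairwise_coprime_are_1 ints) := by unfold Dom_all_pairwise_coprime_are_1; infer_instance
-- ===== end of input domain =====

-- B replaces A's running-product accumulator with a naive nested pairwise gcd scan (alternative decomposition, same results).


-- ===== PORT A =====
-- the second loop of A: for i in ints: if gcd(i, M) != 1: return False; M *= i
def apcLoopA (M : Int) : List Int → Bool
  | [] => true
  | i :: rest => if Int.gcd i M ≠ 1 then false else apcLoopA (M * i) rest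

def all_pairwise_coprime_are_1 (ints : List Int) : Bool :=
  match ints with
  | [] => true                    -- the 'for M in ints: break' loop finds no element
  | M :: rest => apcLoopA M rest

-- ===== PORT B =====
-- B's outer loop with its accumulator 'seen'; the inner 'for p in seen' scan is List.any
def apcLoopB (seen : List Int) : List Int → Bool
  | [] => true
  | i :: rest =>
      if seen.any (fun p => Int.gcd i p ≠ 1) then false
      else apcLoopB (seen ++ [i]) rest

def all_pairwise_coprime_are_1_alt (ints : List Int) : Bool := apcLoopB [] ints

-- ===== PRECONDITION & SPEC =====
def Spec_all_pairwise_coprime_are_1 (ints : List Int) (out : Bool) : Prop := out = all_pairwise_coprime_are_1_alt ints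
instance (ints : List Int) (out : Bool) : Decidable (Spec_all_pairwise_coprime_are_1 ints out) := by unfold Spec_all_pairwise_coprime_are_1; infer_instance

-- ===== CLAIM (what is proved, stated in full; the proofs are below) =====
def Claim_equal_all_pairwise_coprime_are_1 : Prop := ∀ (ints : List Int), Dom_all_pairwise_coprime_are_1 ints → Spec_all_pairwise_coprime_are_1 ints (all_pairwise_coprime_are_1 ints)

-- ===== LEMMAS AND PROOFS =====

-- gcd with a product is 1 iff gcd with every factor is 1
theorem apc_gcd_prod (i : Int) (l : List Int) :
    Int.gcd i l.prod = 1 ↔ ∀ p ∈ l, Int.gcd i p = 1 := by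
  induction l with
  | nil => simp
  | cons p t ih =>
      simp only [List.prod_cons, List.mem_cons]
      constructor
      · intro h
        have h' : Nat.Coprime i.natAbs (p.natAbs * t.prod.natAbs) := by
          simpa [Int.gcd, Int.natAbs_mul] using h
        rcases Nat.coprime_mul_iff_right.mp h' with ⟨h1, h2⟩
        intro q hq
        rcases hq with rfl | hq
        · exact h1
        · exact ih.mp h2 q hq
      · intro h
        have h1 : Int.gcd i p = 1 := h p (Or.inl rfl)
        have h2 : Int.gcd i t.prod = 1 := ih.mpr (fun q hq => h q (Or.inr hq))
        show Int.gcd i (p * t.prod) = 1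
        simpa [Int.gcd, Int.natAbs_mul] using
          Nat.coprime_mul_iff_right.mpr ⟨h1, h2⟩

-- loop invariant: when M is the product of the elements already seen, the two loops agree
theorem apc_loop_eq (rest : List Int) :
    ∀ (seen : List Int), apcLoopA seen.prod rest = apcLoopB seen rest := by
  induction rest with
  | nil => intro seen; rfl
  | cons i t ih =>
      intro seen
      simp only [apcLoopA, apcLoopB]
      by_cases h : Int.gcd i seen.prod = 1
      · have hb : seen.any (fun p => Int.gcd i p ≠ 1) = false := by
          simp only [List.any_eq_false, decide_eq_true_eq, not_not]
          exact (apc_gcd_prod i seen).mp h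
        have hprod : seen.prod * i = (seen ++ [i]).prod := by simp
        rw [if_neg (by simp [h]), if_neg (by rw [hb]; simp), hprod]
        exact ih (seen ++ [i])
      · have hb : seen.any (fun p => Int.gcd i p ≠ 1) = true := by
          rw [List.any_eq_true]
          by_contra hc
          simp only [not_exists, not_and, decide_eq_true_eq, not_not] at hc
          exact h ((apc_gcd_prod i seen).mpr hc)
        rw [if_pos (by simp [h]), if_pos hb]

-- ===== VERDICT (by name: the statement is the Claim_ definition above) =====
theorem all_pairwise_coprime_are_1_spec : Claim_equal_all_pairwise_coprime_are_1 := by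
  intro ints _
  unfold Spec_all_pairwise_coprime_are_1 all_pairwise_coprime_are_1 all_pairwise_coprime_are_1_alt
  cases ints with
  | nil => rfl
  | cons M rest =>
      have h := apc_loop_eq rest [M]
      simpa [apcLoopB] using h
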